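-- pv_equiv track=rewrite | github.com/pisterlabs/promptset | data/scraping-2.0/repos/KinXY~CyberDiva/charaChat.py | pair_response_list
-- ===== SOURCE A (Python) =====
-- def pair_response_list(response_list: list):
--     response_pairs = []
--     # pair the motion and text in the response_list together
--     for i in range(0, len(response_list), 2):
--         if i == len(response_list) - 1:
--             if response_list[i]["type"] == "motion":
--                 motion = response_list[i]["content"]
--                 response_pairs.append({"motion": motion, "text": ""})
--             else:
--                 text = response_list[i]["content"]
--                 response_pairs.append({"motion": "", "text": text})
--             break
--         if response_list[i]["type"] == "motion":
--             motion = response_list[i]["content"]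
--             text = response_list[i + 1]["content"]
--             response_pairs.append({"motion": motion, "text": text})
--         else:
--             motion = response_list[i + 1]["content"]
--             text = response_list[i]["content"]
--             response_pairs.append({"motion": motion, "text": text})
--     return response_pairs
-- ===== SOURCE B (Python) =====
-- def _pair(a, b):
--     m, t = (a, b) if a["type"] == "motion" else (b, a)
--     return {"motion": m["content"], "text": t["content"]}
--
-- def pair_response_list(response_list: list):
--     pairs = []
--     pending = None
--     for item in response_list:
--         if pending is None:
--             pending = item
--         else:
--             pairs.append(_pair(pending, item))
--             pending = None
--     if pending is not None:
--         pairs.append(_pair(pending, {"content": ""}))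
--     return pairs
-- ===== Notes on version B (the rewrite author's own statement) =====
-- stated objective: alternative
-- what changed: Replaces the step-2 indexed loop with its embedded last-element break by a single streaming pass holding a one-element pending buffer, with a unified _pair helper in which the odd trailing element is paired with an empty sentinel instead of a separate singleton branch.
import Mathlib
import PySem

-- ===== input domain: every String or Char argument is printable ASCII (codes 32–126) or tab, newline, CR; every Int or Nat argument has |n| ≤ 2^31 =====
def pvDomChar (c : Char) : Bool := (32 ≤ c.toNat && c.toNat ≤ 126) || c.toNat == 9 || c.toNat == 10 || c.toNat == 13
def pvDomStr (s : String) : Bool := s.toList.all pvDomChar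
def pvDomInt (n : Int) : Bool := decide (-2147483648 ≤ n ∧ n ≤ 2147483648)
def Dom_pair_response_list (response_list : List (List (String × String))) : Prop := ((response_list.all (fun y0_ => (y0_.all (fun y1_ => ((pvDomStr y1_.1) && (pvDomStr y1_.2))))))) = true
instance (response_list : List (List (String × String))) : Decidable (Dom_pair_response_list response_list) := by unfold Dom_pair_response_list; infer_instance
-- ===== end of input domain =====

-- B replaces A's step-2 indexed loop with its embedded last-element break by a single
-- streaming pass over the elements holding a one-element pending buffer, pairing the
-- odd trailing element with an empty sentinel (alternative decomposition; same cost).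

-- dict lookup d[k]: first match in the association list; "" only reached outside Pre_
def pvGetD (d : List (String × String)) (k : String) : String := (d.lookup k).getD ""

def pvMkPair (m t : String) : List (String × String) := [("motion", m), ("text", t)]

-- ===== PORT A =====
-- the 'for i in range(0, len, 2)' loop with its 'break' at i == len-1, as recursion on i
def pvLoopA (rl : List (List (String × String))) (i : Nat) : List (List (String × String)) :=
  if i < rl.length then
    if i = rl.length - 1 then
      if pvGetD (rl.getD i []) "type" == "motion" then
        [pvMkPair (pvGetD (rl.getD i []) "content") ""]
      else
        [pvMkPair "" (pvGetD (rl.getD i []) "content")]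
    else
      (if pvGetD (rl.getD i []) "type" == "motion" then
        pvMkPair (pvGetD (rl.getD i []) "content") (pvGetD (rl.getD (i+1) []) "content")
      else
        pvMkPair (pvGetD (rl.getD (i+1) []) "content") (pvGetD (rl.getD i []) "content"))
      :: pvLoopA rl (i+2)
  else []
termination_by rl.length - i

def pair_response_list (response_list : List (List (String × String))) : List (List (String × String)) :=
  pvLoopA response_list 0

-- ===== PORT B =====
-- Source B's _pair helper: only a's "type" decides the role assignment
def pvPair (a b : List (String × String)) : List (String × String) :=
  let mt := if pvGetD a "type" == "motion" then (a, b) else (b, a)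
  pvMkPair (pvGetD mt.1 "content") (pvGetD mt.2 "content")

-- the loop body: state = (pairs so far, pending element)
def pvStep (st : List (List (String × String)) × Option (List (String × String)))
    (item : List (String × String)) :
    List (List (String × String)) × Option (List (String × String)) :=
  match st.2 with
  | none => (st.1, some item)
  | some p => (st.1 ++ [pvPair p item], none)

def pair_response_list_alt (response_list : List (List (String × String))) : List (List (String × String)) :=
  let st := response_list.foldl pvStep ([], none)
  match st.2 with
  | none => st.1
  | some p => st.1 ++ [pvPair p [("content", "")]]

-- ===== PRECONDITION & SPEC =====
-- Pre_ excludes exactly the inputs on which Python A raises KeyError: an even-index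
-- element missing "type" or "content", or an odd-index element missing "content".
def Pre_pair_response_list (response_list : List (List (String × String))) : Prop :=
  ∀ i < response_list.length,
    (i % 2 = 0 → ((response_list.getD i []).lookup "type").isSome = true
               ∧ ((response_list.getD i []).lookup "content").isSome = true)
    ∧ (i % 2 = 1 → ((response_list.getD i []).lookup "content").isSome = true)
instance (response_list : List (List (String × String))) : Decidable (Pre_pair_response_list response_list) := by unfold Pre_pair_response_list; infer_instance

def pvWitness_pair_response_list : (List (List (String × String))) :=
  [[("type", "motion"), ("content", "wave")], [("type", "text"), ("content", "hi")], [("type", "text"), ("content", "bye")]]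

def Spec_pair_response_list (response_list : List (List (String × String))) (out : List (List (String × String))) : Prop := out = pair_response_list_alt response_list
instance (response_list : List (List (String × String))) (out : List (List (String × String))) : Decidable (Spec_pair_response_list response_list out) := by unfold Spec_pair_response_list; infer_instance

-- ===== CLAIM (what is proved, stated in full; the proofs are below) =====
def Claim_equal_pair_response_list : Prop := ∀ (response_list : List (List (String × String))), Dom_pair_response_list response_list → Pre_pair_response_list response_list → Spec_pair_response_list response_list (pair_response_list response_list)

-- ===== LEMMAS AND PROOFS =====

-- common two-at-a-time shape both ports are reduced to
def pvBSpec : List (List (String × String)) → List (List (String × String))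
  | [] => []
  | [a] => [if pvGetD a "type" == "motion" then pvMkPair (pvGetD a "content") ""
            else pvMkPair "" (pvGetD a "content")]
  | a :: b :: rest =>
      (if pvGetD a "type" == "motion" then
        pvMkPair (pvGetD a "content") (pvGetD b "content")
      else
        pvMkPair (pvGetD b "content") (pvGetD a "content")) :: pvBSpec rest

lemma pvLoopA_eq (n : Nat) : ∀ (rl : List (List (String × String))) (i : Nat),
    rl.length - i ≤ n → pvLoopA rl i = pvBSpec (rl.drop i) := by
  induction n with
  | zero =>
    intro rl i h
    have hle : rl.length ≤ i := by omega
    rw [pvLoopA]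
    simp [List.drop_eq_nil_of_le hle, pvBSpec, Nat.not_lt.mpr hle]
  | succ n ih =>
    intro rl i h
    rw [pvLoopA]
    by_cases hi : i < rl.length
    · have hgd : rl.getD i [] = rl[i] := List.getD_eq_getElem rl [] hi
      by_cases hl : i = rl.length - 1
      · have h1 : rl.length ≤ i + 1 := by omega
        have hdrop : rl.drop i = [rl[i]] := by
          rw [List.drop_eq_getElem_cons hi, List.drop_eq_nil_of_le h1]
        rw [if_pos hi, if_pos hl, hdrop, hgd, pvBSpec]
        split <;> rfl
      · have hi1 : i + 1 < rl.length := by omega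
        have hgd1 : rl.getD (i+1) [] = rl[i+1] := List.getD_eq_getElem rl [] hi1
        have hdrop : rl.drop i = rl[i] :: rl[i+1] :: rl.drop (i+2) := by
          rw [List.drop_eq_getElem_cons hi, List.drop_eq_getElem_cons hi1]
        rw [if_pos hi, if_neg hl, hdrop, hgd, hgd1, ih rl (i+2) (by omega), pvBSpec]
    · have hle : rl.length ≤ i := by omega
      rw [if_neg hi, List.drop_eq_nil_of_le hle, pvBSpec]

-- finishing step of B applied to a fold state
def pvFinish (st : List (List (String × String)) × Option (List (String × String))) :
    List (List (String × String)) :=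
  match st.2 with
  | none => st.1
  | some p => st.1 ++ [pvPair p [("content", "")]]

lemma pvFold_eq : ∀ (rl : List (List (String × String))) (acc : List (List (String × String))),
    pvFinish (rl.foldl pvStep (acc, none)) = acc ++ pvBSpec rl
  | [], acc => by simp [pvFinish, pvBSpec]
  | [a], acc => by
      simp [pvFinish, pvStep, pvBSpec, pvPair, pvGetD]
      split <;> rfl
  | a :: b :: rest, acc => by
      have ih := pvFold_eq rest (acc ++ [pvPair a b])
      simp only [List.foldl_cons, pvStep] at ih ⊢
      rw [ih, pvBSpec]
      simp only [pvPair, pvGetD, List.append_assoc, List.singleton_append]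
      split <;> rfl

lemma pvAlt_eq (rl : List (List (String × String))) :
    pair_response_list_alt rl = pvBSpec rl := by
  have h := pvFold_eq rl []
  simpa [pair_response_list_alt, pvFinish] using h

-- ===== VERDICT (by name: the statement is the Claim_ definition above) =====
theorem pair_response_list_spec : Claim_equal_pair_response_list := by
  intro rl _ _
  unfold Spec_pair_response_list pair_response_list
  rw [pvAlt_eq, pvLoopA_eq rl.length rl 0 (by omega)]
  simp
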